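-- pv_equiv track=rewrite | github.com/azabrs/yandex_training | 1 course/6_lesson/median_union.py | median_union
-- ===== SOURCE A (Python) =====
-- def median_union(seq):
--     res_res = []
--     n = len(seq)
--     m = len(seq[0])
--     for i in range(n - 1):
--         for j in range(i + 1, n):
--             p1 = p2 = 0
--             last = None
--             while p1 + p2 < m:
--                 if p1 < m and (p2 == m or seq[i][p1] < seq[j][p2]):
--                     last = seq[i][p1]
--                     p1 += 1
--                 else:
--                     last = seq[j][p2]
--                     p2 += 1
--             res_res.append(last)
--     return res_res
-- ===== SOURCE B (Python) =====
-- def _merge_last(a, b, m):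
--     # last element taken after m merge steps; advances whole runs at a time
--     p1 = p2 = 0
--     while True:
--         r = m - p1 - p2          # steps still to take (>= 1)
--         if a[p1] < b[p2]:
--             t = 1
--             while t < r and a[p1 + t] < b[p2]:
--                 t += 1
--             if t == r:
--                 return a[p1 + r - 1]
--             p1 += t
--         else:
--             t = 1
--             while t < r and not (a[p1] < b[p2 + t]):
--                 t += 1
--             if t == r:
--                 return b[p2 + r - 1]
--             p2 += t
--
-- def median_union(seq):
--     n = len(seq)
--     m = len(seq[0])
--     return [_merge_last(seq[i], seq[j], m)
--             for i in range(n) for j in range(i + 1, n)]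
-- ===== Notes on version B (the rewrite author's own statement) =====
-- stated objective: faster
-- what changed: B replaces A's element-by-element two-pointer merge (which re-tests the compound loop condition and rewrites 'last' at every step) by a run-advancing merge helper that jumps whole maximal runs from one array at a time, doing one comparison against a fixed pivot per element and returning the m-th element directly from inside the final run, with pair results collected by a comprehension instead of nested append loops.
-- outside the precondition, e.g. on median_union([[1, 2], [5]]): A returns [2], B returns [2]; on median_union([[], []]): A returns [None], B raises IndexError
import Mathlib
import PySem

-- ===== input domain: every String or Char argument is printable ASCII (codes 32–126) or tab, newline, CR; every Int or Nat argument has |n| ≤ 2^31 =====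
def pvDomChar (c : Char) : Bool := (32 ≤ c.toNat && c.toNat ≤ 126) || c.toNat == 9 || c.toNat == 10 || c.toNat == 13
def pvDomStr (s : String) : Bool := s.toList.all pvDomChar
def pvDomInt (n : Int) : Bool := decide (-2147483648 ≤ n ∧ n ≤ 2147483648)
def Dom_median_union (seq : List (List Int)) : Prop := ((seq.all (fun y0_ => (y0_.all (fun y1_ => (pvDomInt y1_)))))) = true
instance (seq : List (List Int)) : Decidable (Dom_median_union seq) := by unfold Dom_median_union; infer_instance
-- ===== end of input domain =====

-- B replaces A's element-by-element two-pointer merge by a run-advancing merge helper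
-- (jumping maximal runs, one comparison against a fixed pivot per element, answering from
-- inside the final run); same O(n^2*m) but a measured constant-factor speed-up.


-- ===== PORT A =====
-- inner 'while p1 + p2 < m' loop of A; 'last' is the last merged element so far.
-- list indexing a[p1] is 'getD _ 0': inside Pre_ every index taken is in range.
def aLoop (a b : List Int) (m p1 p2 : Nat) (last : Option Int) : Option Int :=
  if _h : p1 + p2 < m then
    if p1 < m ∧ (p2 = m ∨ a.getD p1 0 < b.getD p2 0) then
      aLoop a b m (p1 + 1) p2 (some (a.getD p1 0))
    else
      aLoop a b m p1 (p2 + 1) (some (b.getD p2 0))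
  else last
  termination_by m - (p1 + p2)
  decreasing_by all_goals omega

-- 'res_res.append(last)': inside Pre_ the loop ran (m ≥ 1), so 'last' is 'some _'
-- and Option.toList appends exactly that element.
def median_union (seq : List (List Int)) : List Int :=
  let n := seq.length
  let m := (seq.getD 0 []).length
  (List.range (n - 1)).foldl (fun res i =>
    (List.range' (i + 1) (n - (i + 1))).foldl (fun res j =>
      res ++ (aLoop (seq.getD i []) (seq.getD j []) m 0 0 none).toList) res) []

-- ===== PORT B =====
-- 't = 1; while t < r and a[p1 + t] < bv: t += 1' of _merge_last
def scanA (a : List Int) (bv : Int) (p1 t r : Nat) : Nat :=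
  if t < r ∧ a.getD (p1 + t) 0 < bv then scanA a bv p1 (t + 1) r else t
  termination_by r - t
  decreasing_by omega

-- 't = 1; while t < r and not (a[p1] < b[p2 + t]): t += 1' of _merge_last
def scanB (b : List Int) (av : Int) (p2 t r : Nat) : Nat :=
  if t < r ∧ ¬ (av < b.getD (p2 + t) 0) then scanB b av p2 (t + 1) r else t
  termination_by r - t
  decreasing_by omega

-- termination facts cited by bLoop's decreasing_by
theorem scanA_ge (a : List Int) (bv : Int) (p1 : Nat) : ∀ t r, t ≤ scanA a bv p1 t r := by
  intro t r
  induction hk : r - t using Nat.strong_induction_on generalizing t with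
  | _ k ih =>
    rw [scanA]
    split
    · rename_i h
      calc t ≤ t + 1 := by omega
        _ ≤ scanA a bv p1 (t + 1) r := ih (r - (t + 1)) (by omega) (t + 1) rfl
    · exact le_refl t

theorem scanB_ge (b : List Int) (av : Int) (p2 : Nat) : ∀ t r, t ≤ scanB b av p2 t r := by
  intro t r
  induction hk : r - t using Nat.strong_induction_on generalizing t with
  | _ k ih =>
    rw [scanB]
    split
    · rename_i h
      calc t ≤ t + 1 := by omega
        _ ≤ scanB b av p2 (t + 1) r := ih (r - (t + 1)) (by omega) (t + 1) rfl
    · exact le_refl t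

-- 'while True' body of _merge_last; r = m - p1 - p2 is carried as the state.
-- 'if _hr : r = 0 then 0' only makes the recursion total: Python keeps r ≥ 1.
def bLoop (a b : List Int) (r p1 p2 : Nat) : Int :=
  if _hr : r = 0 then 0
  else if a.getD p1 0 < b.getD p2 0 then
    let t := scanA a (b.getD p2 0) p1 1 r
    if t = r then a.getD (p1 + (r - 1)) 0
    else bLoop a b (r - t) (p1 + t) p2
  else
    let t := scanB b (a.getD p1 0) p2 1 r
    if t = r then b.getD (p2 + (r - 1)) 0
    else bLoop a b (r - t) p1 (p2 + t)
  termination_by r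
  decreasing_by
  · have := scanA_ge a (b.getD p2 0) p1 1 r; omega
  · have := scanB_ge b (a.getD p1 0) p2 1 r; omega

def median_union_alt (seq : List (List Int)) : List Int :=
  let n := seq.length
  let m := (seq.getD 0 []).length
  (List.range n).flatMap (fun i =>
    (List.range' (i + 1) (n - (i + 1))).map (fun j =>
      bLoop (seq.getD i []) (seq.getD j []) m 0 0))

-- ===== PRECONDITION & SPEC =====
-- Pre_ excludes inputs where Python A raises IndexError (empty seq; a row shorter than
-- the first row, where the merge may index past its end) or appends None, no Int (first
-- row empty while pairs exist). A few ragged inputs on which the merge happens not to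
-- reach the short row are excluded with it (see cites).
def Pre_median_union (seq : List (List Int)) : Prop :=
  seq ≠ [] ∧ (2 ≤ seq.length →
    1 ≤ (seq.getD 0 []).length ∧ ∀ row ∈ seq, (seq.getD 0 []).length ≤ row.length)
instance (seq : List (List Int)) : Decidable (Pre_median_union seq) := by
  unfold Pre_median_union; infer_instance
def pvWitness_median_union : List (List Int) := [[1, 2], [3, 4]]

def Spec_median_union (seq : List (List Int)) (out : List Int) : Prop := out = median_union_alt seq
instance (seq : List (List Int)) (out : List Int) : Decidable (Spec_median_union seq out) := by unfold Spec_median_union; infer_instance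

-- ===== CLAIM (what is proved, stated in full; the proofs are below) =====
def Claim_equal_median_union : Prop := ∀ (seq : List (List Int)), Dom_median_union seq → Pre_median_union seq → Spec_median_union seq (median_union seq)

-- ===== LEMMAS AND PROOFS =====

theorem scanA_shift (a : List Int) (bv : Int) (p1 : Nat) :
    ∀ k t r, r - t ≤ k → scanA a bv p1 (t + 1) r = scanA a bv (p1 + 1) t (r - 1) + 1 := by
  intro k
  induction k with
  | zero =>
    intro t r h
    conv_lhs => rw [scanA]
    conv_rhs => rw [scanA]
    rw [if_neg (by rintro ⟨h1, -⟩; omega), if_neg (by rintro ⟨h1, -⟩; omega)]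
  | succ k ih =>
    intro t r h
    conv_lhs => rw [scanA]
    conv_rhs => rw [scanA]
    by_cases hc : t + 1 < r ∧ a.getD (p1 + (t + 1)) 0 < bv
    · rw [if_pos hc, if_pos ⟨by omega, by
        have e : p1 + 1 + t = p1 + (t + 1) := by omega
        rw [e]; exact hc.2⟩]
      exact ih (t + 1) r (by omega)
    · rw [if_neg hc, if_neg (by
        rintro ⟨h1, h2⟩
        exact hc ⟨by omega, by
          have e : p1 + (t + 1) = p1 + 1 + t := by omega
          rw [e]; exact h2⟩)]

theorem scanB_shift (b : List Int) (av : Int) (p2 : Nat) :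
    ∀ k t r, r - t ≤ k → scanB b av p2 (t + 1) r = scanB b av (p2 + 1) t (r - 1) + 1 := by
  intro k
  induction k with
  | zero =>
    intro t r h
    conv_lhs => rw [scanB]
    conv_rhs => rw [scanB]
    rw [if_neg (by rintro ⟨h1, -⟩; omega), if_neg (by rintro ⟨h1, -⟩; omega)]
  | succ k ih =>
    intro t r h
    conv_lhs => rw [scanB]
    conv_rhs => rw [scanB]
    by_cases hc : t + 1 < r ∧ ¬ (av < b.getD (p2 + (t + 1)) 0)
    · rw [if_pos hc, if_pos ⟨by omega, by
        have e : p2 + 1 + t = p2 + (t + 1) := by omega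
        rw [e]; exact hc.2⟩]
      exact ih (t + 1) r (by omega)
    · rw [if_neg hc, if_neg (by
        rintro ⟨h1, h2⟩
        exact hc ⟨by omega, by
          have e : p2 + (t + 1) = p2 + 1 + t := by omega
          rw [e]; exact h2⟩)]

-- one A-style merge step of the run-advancing loop
theorem bLoop_step (a b : List Int) (r p1 p2 : Nat) (hr : 1 ≤ r) :
    bLoop a b r p1 p2 =
      if a.getD p1 0 < b.getD p2 0 then
        (if r = 1 then a.getD p1 0 else bLoop a b (r - 1) (p1 + 1) p2)
      else
        (if r = 1 then b.getD p2 0 else bLoop a b (r - 1) p1 (p2 + 1)) := by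
  rw [bLoop, dif_neg (by omega)]
  by_cases hx : a.getD p1 0 < b.getD p2 0
  · rw [if_pos hx, if_pos hx]
    by_cases h1 : r = 1
    · subst h1
      have ht : scanA a (b.getD p2 0) p1 1 1 = 1 := by rw [scanA, if_neg (by rintro ⟨h1, -⟩; omega)]
      simp only [ht]
      norm_num
    · rw [if_neg h1]
      by_cases h2 : a.getD (p1 + 1) 0 < b.getD p2 0
      · have ht : scanA a (b.getD p2 0) p1 1 r
            = scanA a (b.getD p2 0) (p1 + 1) 1 (r - 1) + 1 := by
          rw [scanA, if_pos ⟨by omega, h2⟩]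
          exact scanA_shift a (b.getD p2 0) p1 (r - 1) 1 r (by omega)
        set s := scanA a (b.getD p2 0) (p1 + 1) 1 (r - 1) with hs
        have hs1 : 1 ≤ s := scanA_ge a (b.getD p2 0) (p1 + 1) 1 (r - 1)
        rw [bLoop, dif_neg (by omega), if_pos h2, ← hs]
        simp only [ht]
        by_cases he : s = r - 1
        · rw [if_pos (by omega), if_pos he]
          have : p1 + (r - 1) = p1 + 1 + (r - 1 - 1) := by omega
          rw [this]
        · rw [if_neg (by omega), if_neg he]
          have e1 : r - (s + 1) = r - 1 - s := by omega
          have e2 : p1 + (s + 1) = p1 + 1 + s := by omega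
          rw [e1, e2]
      · have ht : scanA a (b.getD p2 0) p1 1 r = 1 := by
          rw [scanA, if_neg (by rintro ⟨-, hh⟩; exact h2 hh)]
        simp only [ht]
        rw [if_neg (by omega)]
  · rw [if_neg hx, if_neg hx]
    by_cases h1 : r = 1
    · subst h1
      have ht : scanB b (a.getD p1 0) p2 1 1 = 1 := by rw [scanB, if_neg (by rintro ⟨h1, -⟩; omega)]
      simp only [ht]
      norm_num
    · rw [if_neg h1]
      by_cases h2 : a.getD p1 0 < b.getD (p2 + 1) 0
      · have ht : scanB b (a.getD p1 0) p2 1 r = 1 := by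
          rw [scanB, if_neg (by rintro ⟨-, hh⟩; exact hh h2)]
        simp only [ht]
        rw [if_neg (by omega)]
      · have ht : scanB b (a.getD p1 0) p2 1 r
            = scanB b (a.getD p1 0) (p2 + 1) 1 (r - 1) + 1 := by
          rw [scanB, if_pos ⟨by omega, h2⟩]
          exact scanB_shift b (a.getD p1 0) p2 (r - 1) 1 r (by omega)
        set s := scanB b (a.getD p1 0) (p2 + 1) 1 (r - 1) with hs
        have hs1 : 1 ≤ s := scanB_ge b (a.getD p1 0) (p2 + 1) 1 (r - 1)
        rw [bLoop, dif_neg (by omega), if_neg h2, ← hs]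
        simp only [ht]
        by_cases he : s = r - 1
        · rw [if_pos (by omega), if_pos he]
          have : p2 + (r - 1) = p2 + 1 + (r - 1 - 1) := by omega
          rw [this]
        · rw [if_neg (by omega), if_neg he]
          have e1 : r - (s + 1) = r - 1 - s := by omega
          have e2 : p2 + (s + 1) = p2 + 1 + s := by omega
          rw [e1, e2]

theorem merge_eq (a b : List Int) (m : Nat) :
    ∀ r p1 p2 last, p1 + p2 < m → r = m - (p1 + p2) →
      aLoop a b m p1 p2 last = some (bLoop a b r p1 p2) := by
  intro r
  induction r with
  | zero => intro p1 p2 last h hr; omega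
  | succ k ih =>
    intro p1 p2 last h hr
    rw [aLoop, dif_pos h]
    rw [bLoop_step a b (k + 1) p1 p2 (by omega)]
    by_cases hx : a.getD p1 0 < b.getD p2 0
    · rw [if_pos ⟨by omega, Or.inr hx⟩, if_pos hx]
      by_cases hk : k = 0
      · subst hk
        rw [if_pos rfl, aLoop, dif_neg (by omega)]
      · rw [if_neg (by omega)]
        have := ih (p1 + 1) p2 (some (a.getD p1 0)) (by omega) (by omega)
        simpa using this
    · rw [if_neg (by intro ⟨_, hor⟩; rcases hor with hh | hh; omega; exact hx hh),
          if_neg hx]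
      by_cases hk : k = 0
      · subst hk
        rw [if_pos rfl, aLoop, dif_neg (by omega)]
      · rw [if_neg (by omega)]
        have := ih p1 (p2 + 1) (some (b.getD p2 0)) (by omega) (by omega)
        simpa using this

-- A's nested append-loops as one flatMap
theorem foldl2_eq_flatMap (g : Nat → Nat → List Int) (inner : Nat → List Nat) :
    ∀ (l : List Nat) (acc : List Int),
      l.foldl (fun res i => (inner i).foldl (fun res j => res ++ g i j) res) acc
        = acc ++ l.flatMap (fun i => (inner i).flatMap (g i)) := by
  intro l
  induction l with
  | nil => intro acc; simp
  | cons i l ih =>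
    intro acc
    simp only [List.foldl_cons, List.flatMap_cons]
    rw [PySem.List.foldl_append_eq_flatMap, ih, List.append_assoc]

theorem median_union_spec_aux (seq : List (List Int)) (hpre : Pre_median_union seq) :
    median_union seq = median_union_alt seq := by
  obtain ⟨hne, hrows⟩ := hpre
  unfold median_union median_union_alt
  simp only []
  set n := seq.length with hn
  set m := (seq.getD 0 []).length with hm
  rw [foldl2_eq_flatMap]
  by_cases h2 : 2 ≤ n
  · have hm1 : 1 ≤ m := (hrows h2).1
    have hone : ∀ i j : Nat,
        (aLoop (seq.getD i []) (seq.getD j []) m 0 0 none).toList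
          = [bLoop (seq.getD i []) (seq.getD j []) m 0 0] := by
      intro i j
      rw [merge_eq (seq.getD i []) (seq.getD j []) m m 0 0 none (by omega) (by omega)]
      rfl
    have hinner : ∀ i : Nat,
        (List.range' (i + 1) (n - (i + 1))).flatMap
            (fun j => (aLoop (seq.getD i []) (seq.getD j []) m 0 0 none).toList)
          = (List.range' (i + 1) (n - (i + 1))).map
            (fun j => bLoop (seq.getD i []) (seq.getD j []) m 0 0) := by
      intro i
      induction (List.range' (i + 1) (n - (i + 1))) with
      | nil => simp
      | cons j l ihl =>
        simp only [List.flatMap_cons, List.map_cons, hone i j, ihl]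
        simp
    simp only [hinner]
    have hr : List.range n = List.range (n - 1) ++ [n - 1] := by
      conv_lhs => rw [show n = (n - 1) + 1 by omega]
      rw [List.range_succ]
    rw [hr, List.flatMap_append]
    have hz : n - (n - 1 + 1) = 0 := by omega
    simp [hz]
  · have hn1 : n = 1 := by
      have : 1 ≤ n := by
        cases seq with
        | nil => exact absurd rfl hne
        | cons x xs => simp [hn]
      omega
    rw [hn1]
    simp

-- ===== VERDICT (by name: the statement is the Claim_ definition above) =====
theorem median_union_spec : Claim_equal_median_union := by
  intro seq _ hpre
  unfold Spec_median_union
  exact median_union_spec_aux seq hpre
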